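-- pv_equiv track=rewrite | github.com/AlecGrover/Commandline-Sweeper | dpll.py | checkAllTrue
-- ===== SOURCE A (Python) =====
-- def checkAllTrue(instance):
--     # Check if all vars can be assigned true
--     v = set()
--     for clause in instance:
--         for literal in clause:
--             v.add(literal)
--             if -literal in v:
--                 return False
--     return True
-- ===== SOURCE B (Python) =====
-- def checkAllTrue(instance):
--     # Check if all vars can be assigned true:
--     # sort the distinct literals, then sweep inward from both ends looking for a pair summing to 0
--     # (a conflict is exactly a pair lit, -lit; literal 0 pairs with itself).
--     lits = sorted({lit for clause in instance for lit in clause})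
--     while lits:
--         s = lits[0] + lits[-1]
--         if s == 0:
--             return False
--         if s < 0:
--             lits = lits[1:]
--         else:
--             lits = lits[:-1]
--     return True
-- ===== Notes on version B (the rewrite author's own statement) =====
-- stated objective: alternative
-- what changed: Replaces the grow-a-set-and-test-membership loop by sort-then-two-pointer: sort the distinct literals once, then sweep inward from both ends looking for a pair summing to 0 (a conflict is exactly such a pair), with no membership test at all.
import Mathlib
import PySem

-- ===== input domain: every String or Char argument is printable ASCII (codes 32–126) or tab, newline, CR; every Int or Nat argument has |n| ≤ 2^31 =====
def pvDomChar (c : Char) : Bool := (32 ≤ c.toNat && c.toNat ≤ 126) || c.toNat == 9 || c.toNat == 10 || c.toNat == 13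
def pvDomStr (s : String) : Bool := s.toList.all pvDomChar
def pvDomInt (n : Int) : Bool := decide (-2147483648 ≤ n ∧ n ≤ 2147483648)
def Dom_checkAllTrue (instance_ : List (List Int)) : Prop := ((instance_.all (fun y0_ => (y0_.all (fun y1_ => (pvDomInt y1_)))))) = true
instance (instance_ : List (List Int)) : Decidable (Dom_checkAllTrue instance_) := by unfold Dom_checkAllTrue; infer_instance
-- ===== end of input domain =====

-- B sorts the distinct literals once and then sweeps inward from both ends looking for a pair
-- summing to 0 (a conflict is exactly a pair lit, -lit; 0 pairs with itself), with no membership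
-- test; A interleaves growing a hash set with a negation-membership check and returns early.

-- ===== PORT A =====
-- inner 'for literal in clause' loop: none = 'return False' was hit, some v = loop finished with set v
def caGoLit (v : PySem.Set Int) : List Int → Option (PySem.Set Int)
  | [] => some v
  | l :: rest =>
    let v' := v.add l
    if v'.contains (-l) then none else caGoLit v' rest

-- outer 'for clause in instance' loop
def caGoClauses (v : PySem.Set Int) : List (List Int) → Bool
  | [] => true
  | c :: cs =>
    match caGoLit v c with
    | none => false
    | some v' => caGoClauses v' cs

def checkAllTrue (instance_ : List (List Int)) : Bool :=
  caGoClauses PySem.Set.empty instance_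

-- ===== PORT B =====
-- 'while lits:' loop; in the loop body lits is nonempty, so lits[0] is the head, lits[-1] the
-- last element, lits[1:] the tail and lits[:-1] dropLast — exact for nonempty lists.
def tpLoop (lits : List Int) : Bool :=
  match lits with
  | [] => true
  | a :: rest =>
    let b := (a :: rest).getLast (by simp)
    let s := a + b
    if s == 0 then false
    else if s < 0 then tpLoop rest
    else tpLoop (a :: rest).dropLast
termination_by lits.length
decreasing_by
  · simp
  · simp [List.length_dropLast]

-- sorted({lit for clause in instance for lit in clause})
def checkAllTrue_alt (instance_ : List (List Int)) : Bool :=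
  tpLoop (PySem.List.sorted (PySem.Set.ofList (instance_.flatMap (fun clause => clause))) (fun x => x) false)

-- ===== PRECONDITION & SPEC =====
def Spec_checkAllTrue (instance_ : List (List Int)) (out : Bool) : Prop := out = checkAllTrue_alt instance_
instance (instance_ : List (List Int)) (out : Bool) : Decidable (Spec_checkAllTrue instance_ out) := by unfold Spec_checkAllTrue; infer_instance

-- ===== CLAIM (what is proved, stated in full; the proofs are below) =====
def Claim_equal_checkAllTrue : Prop := ∀ (instance_ : List (List Int)), Dom_checkAllTrue instance_ → Spec_checkAllTrue instance_ (checkAllTrue instance_)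

-- ===== LEMMAS AND PROOFS =====

-- ---- A side: checkAllTrue = true ↔ no literal and its negation both occur ----

def ConfFree (v : PySem.Set Int) : Prop := ∀ l ∈ v, (-l) ∉ v

lemma goLit_spec (c : List Int) : ∀ (v : PySem.Set Int), ConfFree v →
    (caGoLit v c = some (PySem.Set.update v c) ∧ ConfFree (PySem.Set.update v c)
      ∧ ¬ ∃ l, (l ∈ v ∨ l ∈ c) ∧ ((-l) ∈ v ∨ (-l) ∈ c))
    ∨ (caGoLit v c = none ∧ ∃ l, (l ∈ v ∨ l ∈ c) ∧ ((-l) ∈ v ∨ (-l) ∈ c)) := by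
  induction c with
  | nil =>
    intro v hv
    left
    refine ⟨rfl, ?_, ?_⟩
    · intro l hl
      simp only [PySem.Set.update_nil] at *
      exact hv l hl
    · rintro ⟨l, ⟨hl, hnl⟩⟩
      simp only [List.not_mem_nil, or_false] at hl hnl
      exact hv l hl hnl
  | cons x rest ih =>
    intro v hv
    simp only [caGoLit]
    by_cases hc : (PySem.Set.add v x).contains (-x) = true
    · right
      rw [hc]
      refine ⟨by simp, ⟨x, Or.inr (by simp), ?_⟩⟩
      rw [PySem.Set.contains_iff, PySem.Set.mem_add] at hc
      rcases hc with h | h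
      · exact Or.inl h
      · right; rw [h]; simp
    · have hc' : ¬ (-x) ∈ PySem.Set.add v x := by
        rw [← PySem.Set.contains_iff]; simpa using hc
      have hfree : ConfFree (PySem.Set.add v x) := by
        intro l hl
        rw [PySem.Set.mem_add] at hl
        rcases hl with hl | hl
        · intro hn
          rw [PySem.Set.mem_add] at hn
          rcases hn with hn | hn
          · exact hv l hl hn
          · apply hc'
            rw [PySem.Set.mem_add]
            left
            have : l = -x := by omega
            rw [← this]; exact hl
        · subst hl; exact hc'
      rw [Bool.not_eq_true] at hc
      rw [hc]
      simp only [if_false, Bool.false_eq_true]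
      rcases ih (PySem.Set.add v x) hfree with ⟨h1, h2, h3⟩ | ⟨h1, h2⟩
      · left
        have hupd : PySem.Set.update (PySem.Set.add v x) rest = PySem.Set.update v (x :: rest) := by
          rw [PySem.Set.update_cons]
        refine ⟨by rw [h1, hupd], by rw [← hupd]; exact h2, ?_⟩
        rintro ⟨l, hl, hnl⟩
        apply h3
        refine ⟨l, ?_, ?_⟩
        · rcases hl with hl | hl
          · exact Or.inl (by rw [PySem.Set.mem_add]; exact Or.inl hl)
          · rcases List.mem_cons.mp hl with hl | hl
            · exact Or.inl (by rw [PySem.Set.mem_add]; exact Or.inr hl)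
            · exact Or.inr hl
        · rcases hnl with hnl | hnl
          · exact Or.inl (by rw [PySem.Set.mem_add]; exact Or.inl hnl)
          · rcases List.mem_cons.mp hnl with hnl | hnl
            · exact Or.inl (by rw [PySem.Set.mem_add]; exact Or.inr hnl)
            · exact Or.inr hnl
      · right
        refine ⟨h1, ?_⟩
        obtain ⟨l, hl, hnl⟩ := h2
        refine ⟨l, ?_, ?_⟩
        · rcases hl with hl | hl
          · rw [PySem.Set.mem_add] at hl
            rcases hl with hl | hl
            · exact Or.inl hl
            · exact Or.inr (by simp [hl])
          · exact Or.inr (List.mem_cons_of_mem _ hl)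
        · rcases hnl with hnl | hnl
          · rw [PySem.Set.mem_add] at hnl
            rcases hnl with hnl | hnl
            · exact Or.inl hnl
            · exact Or.inr (by simp [hnl])
          · exact Or.inr (List.mem_cons_of_mem _ hnl)

lemma goClauses_spec (cs : List (List Int)) : ∀ (v : PySem.Set Int), ConfFree v →
    (caGoClauses v cs = true ↔
      ¬ ∃ l, (l ∈ v ∨ l ∈ cs.flatMap (fun c => c)) ∧ ((-l) ∈ v ∨ (-l) ∈ cs.flatMap (fun c => c))) := by
  induction cs with
  | nil =>
    intro v hv
    simp only [caGoClauses, List.flatMap_nil, List.not_mem_nil, or_false]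
    constructor
    · rintro _ ⟨l, hl, hnl⟩; exact hv l hl hnl
    · intro _; trivial
  | cons c cs ih =>
    intro v hv
    simp only [caGoClauses, List.flatMap_cons]
    rcases goLit_spec c v hv with ⟨h1, h2, h3⟩ | ⟨h1, h2⟩
    · rw [h1]
      rw [ih _ h2]
      constructor
      · intro h ⟨l, hl, hnl⟩
        apply h
        refine ⟨l, ?_, ?_⟩
        · rcases hl with hl | hl
          · exact Or.inl (by rw [PySem.Set.mem_update]; exact Or.inl hl)
          · rcases List.mem_append.mp hl with hl | hl
            · exact Or.inl (by rw [PySem.Set.mem_update]; exact Or.inr hl)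
            · exact Or.inr hl
        · rcases hnl with hnl | hnl
          · exact Or.inl (by rw [PySem.Set.mem_update]; exact Or.inl hnl)
          · rcases List.mem_append.mp hnl with hnl | hnl
            · exact Or.inl (by rw [PySem.Set.mem_update]; exact Or.inr hnl)
            · exact Or.inr hnl
      · intro h ⟨l, hl, hnl⟩
        apply h
        refine ⟨l, ?_, ?_⟩
        · rcases hl with hl | hl
          · rw [PySem.Set.mem_update] at hl
            rcases hl with hl | hl
            · exact Or.inl hl
            · exact Or.inr (List.mem_append.mpr (Or.inl hl))
          · exact Or.inr (List.mem_append.mpr (Or.inr hl))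
        · rcases hnl with hnl | hnl
          · rw [PySem.Set.mem_update] at hnl
            rcases hnl with hnl | hnl
            · exact Or.inl hnl
            · exact Or.inr (List.mem_append.mpr (Or.inl hnl))
          · exact Or.inr (List.mem_append.mpr (Or.inr hnl))
    · rw [h1]
      simp only [Bool.false_eq_true, false_iff, not_not]
      obtain ⟨l, hl, hnl⟩ := h2
      refine ⟨l, ?_, ?_⟩
      · rcases hl with hl | hl
        · exact Or.inl hl
        · exact Or.inr (List.mem_append.mpr (Or.inl hl))
      · rcases hnl with hnl | hnl
        · exact Or.inl hnl
        · exact Or.inr (List.mem_append.mpr (Or.inl hnl))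

lemma checkAllTrue_iff (instance_ : List (List Int)) :
    checkAllTrue instance_ = true ↔
      ¬ ∃ l ∈ instance_.flatMap (fun c => c), (-l) ∈ instance_.flatMap (fun c => c) := by
  unfold checkAllTrue
  rw [goClauses_spec instance_ PySem.Set.empty (by intro l hl; simp [PySem.Set.empty] at hl)]
  constructor
  · intro h ⟨l, hl, hnl⟩
    exact h ⟨l, Or.inr hl, Or.inr hnl⟩
  · intro h ⟨l, hl, hnl⟩
    rcases hl with hl | hl
    · simp [PySem.Set.empty] at hl
    rcases hnl with hnl | hnl
    · simp [PySem.Set.empty] at hnl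
    exact h ⟨l, hl, hnl⟩

-- ---- B side: on a (weakly) sorted list, tpLoop = true ↔ no two elements sum to 0 ----

lemma le_getLast_of_pairwise : ∀ (l : List Int) (hl : l ≠ []),
    l.Pairwise (· ≤ ·) → ∀ x ∈ l, x ≤ l.getLast hl := by
  intro l
  induction l with
  | nil => intro hl; exact absurd rfl hl
  | cons a rest ih =>
    intro _ hp x hx
    rcases rest with _ | ⟨b, rest'⟩
    · simp at hx; simp [hx]
    · rw [List.getLast_cons (by simp)]
      rcases List.mem_cons.mp hx with hx | hx
      · subst hx
        calc x ≤ b := (List.pairwise_cons.mp hp).1 b (by simp)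
          _ ≤ (b :: rest').getLast (by simp) := ih (by simp) (List.pairwise_cons.mp hp).2 b (by simp)
      · exact ih (by simp) (List.pairwise_cons.mp hp).2 x hx

lemma tpLoop_iff : ∀ (lits : List Int), lits.Pairwise (· ≤ ·) →
    (tpLoop lits = true ↔ ¬ ∃ a ∈ lits, ∃ b ∈ lits, a + b = 0) := by
  intro lits
  induction lits using tpLoop.induct with
  | case1 => intro _; simp [tpLoop]
  | case2 a rest b s h =>
    intro _
    rw [tpLoop, if_pos h]
    simp only [Bool.false_eq_true, false_iff, not_not]
    refine ⟨a, by simp, (a :: rest).getLast (by simp), List.getLast_mem _, ?_⟩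
    have := of_decide_eq_true h
    omega
  | case3 a rest b s h1 h2 ih =>
    intro hp
    have hmin : ∀ y ∈ a :: rest, a ≤ y := by
      intro y hy
      rcases List.mem_cons.mp hy with hy | hy
      · omega
      · exact (List.pairwise_cons.mp hp).1 y hy
    have hmax := le_getLast_of_pairwise (a :: rest) (by simp) hp
    rw [tpLoop, if_neg h1, if_pos h2]
    rw [ih (List.pairwise_cons.mp hp).2]
    apply not_congr
    constructor
    · rintro ⟨x, hx, y, hy, hxy⟩
      exact ⟨x, List.mem_cons_of_mem _ hx, y, List.mem_cons_of_mem _ hy, hxy⟩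
    · rintro ⟨x, hx, y, hy, hxy⟩
      have hx' : x ∈ rest := by
        rcases List.mem_cons.mp hx with h | h
        · exfalso; have := hmax y hy; omega
        · exact h
      have hy' : y ∈ rest := by
        rcases List.mem_cons.mp hy with h | h
        · exfalso; have := hmax x hx; omega
        · exact h
      exact ⟨x, hx', y, hy', hxy⟩
  | case4 a rest b s h1 h2 ih =>
    intro hp
    have hmin : ∀ y ∈ a :: rest, a ≤ y := by
      intro y hy
      rcases List.mem_cons.mp hy with hy | hy
      · omega
      · exact (List.pairwise_cons.mp hp).1 y hy
    have hmax := le_getLast_of_pairwise (a :: rest) (by simp) hp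
    have hsplit : ∀ x, x ∈ (a :: rest) ↔ x ∈ (a :: rest).dropLast ∨ x = (a :: rest).getLast (by simp) := by
      intro x
      conv_lhs => rw [← List.dropLast_append_getLast (l := a :: rest) (by simp)]
      simp
    have hpos : 0 < a + (a :: rest).getLast (by simp) := by
      have h1' : ¬ a + (a :: rest).getLast (by simp) = 0 := by simpa using h1
      have h2' : ¬ a + (a :: rest).getLast (by simp) < 0 := by simpa using h2
      omega
    rw [tpLoop, if_neg h1, if_neg h2]
    rw [ih (hp.sublist (List.dropLast_sublist _))]
    apply not_congr
    constructor
    · rintro ⟨x, hx, y, hy, hxy⟩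
      exact ⟨x, (hsplit x).mpr (Or.inl hx), y, (hsplit y).mpr (Or.inl hy), hxy⟩
    · rintro ⟨x, hx, y, hy, hxy⟩
      have hx' : x ∈ (a :: rest).dropLast := by
        rcases (hsplit x).mp hx with h | h
        · exact h
        · exfalso; have hya := hmin y hy; rw [h] at hxy; omega
      have hy' : y ∈ (a :: rest).dropLast := by
        rcases (hsplit y).mp hy with h | h
        · exact h
        · exfalso; have hxa := hmin x hx; rw [h] at hxy; omega
      exact ⟨x, hx', y, hy', hxy⟩

-- ===== VERDICT (by name: the statement is the Claim_ definition above) =====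
theorem checkAllTrue_spec : Claim_equal_checkAllTrue := by
  intro instance_ _
  unfold Spec_checkAllTrue checkAllTrue_alt
  rw [Bool.eq_iff_iff, checkAllTrue_iff,
    tpLoop_iff _ (PySem.List.sorted_pairwise _ _)]
  apply not_congr
  constructor
  · rintro ⟨l, hl, hnl⟩
    refine ⟨l, ?_, -l, ?_, by omega⟩
    · exact (PySem.List.mem_sorted _ _ _ _).mpr ((PySem.Set.mem_ofList _ _).mpr (by simpa using hl))
    · exact (PySem.List.mem_sorted _ _ _ _).mpr ((PySem.Set.mem_ofList _ _).mpr (by simpa using hnl))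
  · rintro ⟨x, hx, y, hy, hxy⟩
    rw [PySem.List.mem_sorted, PySem.Set.mem_ofList, List.mem_flatMap] at hx hy
    have : y = -x := by omega
    exact ⟨x, by simpa using hx, by rw [← this]; simpa using hy⟩
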